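-- pv_equiv track=rewrite | github.com/vdesmond/receiver-diversity-combining | utils.py | check_modes
-- ===== SOURCE A (Python) =====
-- from itertools import chain, combinations
--
-- def check_modes(mode):
--     """
--     This function checks the mode tuple and returns a sorted tuple
--     if all modes are valid.
--
--     Args:
--         mode (tuple): Tuple of modes to be simulated
--
--     Returns:
--         [tuple]: Sorted tuple if modes are valid else None
--     """
--     sorted_mode = tuple(sorted(mode))
--     all_modes = ("dirc", "egc", "mrc", "selc")
--     all_combs = list(
--         chain(*(list(combinations(all_modes, i + 1)) for i in range(len(all_modes))))
--     )
--     if sorted_mode in all_combs: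
--         return sorted_mode
-- ===== SOURCE B (Python) =====
-- def check_modes(mode):
--     """Validate directly: sorted tuple must be nonempty, all-valid, duplicate-free."""
--     allowed = ("dirc", "egc", "mrc", "selc")
--     s = tuple(sorted(mode))
--     if s and all(m in allowed for m in s) and all(a != b for a, b in zip(s, s[1:])):
--         return s
-- ===== Notes on version B (the rewrite author's own statement) =====
-- stated objective: simpler
-- what changed: Instead of enumerating all 15 nonempty combinations of the four modes and testing membership, B validates the sorted tuple directly: nonempty, every element one of the four valid modes, and no adjacent duplicates.
import Mathlib
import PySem

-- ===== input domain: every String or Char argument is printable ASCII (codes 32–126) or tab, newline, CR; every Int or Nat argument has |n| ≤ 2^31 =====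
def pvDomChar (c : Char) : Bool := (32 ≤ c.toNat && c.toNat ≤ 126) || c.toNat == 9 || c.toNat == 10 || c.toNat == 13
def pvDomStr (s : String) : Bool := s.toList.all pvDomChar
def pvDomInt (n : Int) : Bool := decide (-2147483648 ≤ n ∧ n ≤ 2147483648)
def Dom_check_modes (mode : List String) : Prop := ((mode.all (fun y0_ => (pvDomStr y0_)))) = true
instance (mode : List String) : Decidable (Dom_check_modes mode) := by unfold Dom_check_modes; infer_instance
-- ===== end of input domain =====

-- B validates the sorted tuple directly (nonempty, all elements valid, no adjacent duplicates)
-- instead of enumerating all 15 combinations of the four modes: simpler, one pass over the sorted tuple.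


-- ===== PORT A =====
-- itertools.combinations(xs, r) over a list, preserving order (exact for distinct inputs as here)
def pyCombs (xs : List String) : Nat → List (List String)
  | 0 => [[]]
  | Nat.succ n =>
    match xs with
    | [] => []
    | x :: rest => (pyCombs rest n).map (fun c => x :: c) ++ pyCombs rest (Nat.succ n)

def check_modes (mode : List String) : Option (List String) :=
  let sorted_mode := PySem.List.sorted mode (fun x => x) false
  let all_modes : List String := ["dirc", "egc", "mrc", "selc"]
  let all_combs := (List.range all_modes.length).flatMap (fun i => pyCombs all_modes (i + 1))
  if sorted_mode ∈ all_combs then some sorted_mode else none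

-- ===== PORT B =====
def check_modes_alt (mode : List String) : Option (List String) :=
  let allowed : List String := ["dirc", "egc", "mrc", "selc"]
  let s := PySem.List.sorted mode (fun x => x) false
  if !s.isEmpty && s.all (fun m => allowed.contains m)
      && (s.zip s.tail).all (fun p => p.1 != p.2) then
    some s
  else
    none

-- ===== PRECONDITION & SPEC =====
def Spec_check_modes (mode : List String) (out : Option (List String)) : Prop := out = check_modes_alt mode
instance (mode : List String) (out : Option (List String)) : Decidable (Spec_check_modes mode out) := by unfold Spec_check_modes; infer_instance

-- ===== CLAIM (what is proved, stated in full; the proofs are below) =====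
def Claim_equal_check_modes : Prop := ∀ (mode : List String), Dom_check_modes mode → Spec_check_modes mode (check_modes mode)

-- ===== LEMMAS AND PROOFS =====

theorem allowed_pairwise_lt : (["dirc", "egc", "mrc", "selc"] : List String).Pairwise (· < ·) := by
  refine List.Pairwise.imp (fun h => String.lt_iff_toList_lt.mpr h) ?_
  decide

-- adjacent-pairs-all-distinct together with ≤-sortedness gives a strictly increasing list
theorem pairwise_lt_of_sorted_zip (s : List String) (hle : s.Pairwise (· ≤ ·))
    (hne : (s.zip s.tail).all (fun p => p.1 != p.2) = true) : s.Pairwise (· < ·) := by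
  induction s with
  | nil => exact List.Pairwise.nil
  | cons a t ih =>
    rcases List.pairwise_cons.mp hle with ⟨hab, hle'⟩
    cases t with
    | nil => simp
    | cons b u =>
      simp only [List.tail_cons, List.zip_cons_cons, List.all_cons, Bool.and_eq_true] at hne
      obtain ⟨h1, h2⟩ := hne
      have hab' : a ≠ b := by simpa using h1
      have htail : (b :: u).Pairwise (· < ·) := ih hle' h2
      refine List.pairwise_cons.mpr ⟨?_, htail⟩
      intro x hx
      rcases List.mem_cons.mp hx with h | h
      · exact h ▸ lt_of_le_of_ne (hab b (by simp)) hab'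
      · exact lt_of_lt_of_le (lt_of_le_of_ne (hab b (by simp)) hab')
          ((List.pairwise_cons.mp hle').1 x h)

-- a strictly increasing list whose elements all lie in a strictly increasing list is its sublist
theorem sublist_of_pairwise_lt_subset :
    ∀ (r : List String), r.Pairwise (· < ·) → ∀ (l : List String), l.Pairwise (· < ·) →
      (∀ x ∈ l, x ∈ r) → l.Sublist r := by
  intro r
  induction r with
  | nil =>
    intro _ l _ hsub
    cases l with
    | nil => exact List.Sublist.refl _
    | cons a t => exact absurd (hsub a (by simp)) (by simp)
  | cons b r' ihr =>
    intro hr l hl hsub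
    rcases List.pairwise_cons.mp hr with ⟨hbr, hr'⟩
    cases l with
    | nil => exact List.nil_sublist _
    | cons a t =>
      rcases List.pairwise_cons.mp hl with ⟨hat, hl'⟩
      by_cases hab : a = b
      · subst hab
        refine List.Sublist.cons₂ a (ihr hr' t hl' ?_)
        intro x hx
        have hx' := hsub x (List.mem_cons_of_mem _ hx)
        rcases List.mem_cons.mp hx' with h | h
        · exact absurd h.symm (ne_of_lt (hat x hx))
        · exact h
      · have hmem : a ∈ r' := by
          rcases List.mem_cons.mp (hsub a (by simp)) with h | h
          · exact absurd h hab
          · exact h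
        refine List.Sublist.cons b (ihr hr' (a :: t) (List.pairwise_cons.mpr ⟨hat, hl'⟩) ?_)
        intro x hx
        rcases List.mem_cons.mp hx with h | h
        · exact h ▸ hmem
        · have hax : a < x := hat x h
          have hbx : b < a := hbr a hmem
          rcases List.mem_cons.mp (hsub x hx) with h' | h'
          · exact absurd h'.symm (ne_of_lt (hbx.trans hax))
          · exact h'

-- the core characterisation: for a ≤-sorted list, membership in A's enumeration of all
-- combinations equals B's direct validity test
theorem mem_combs_iff_valid (s : List String) (hle : s.Pairwise (· ≤ ·)) :
    (s ∈ (List.range (["dirc", "egc", "mrc", "selc"] : List String).length).flatMap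
        (fun i => pyCombs ["dirc", "egc", "mrc", "selc"] (i + 1)))
      ↔ (!s.isEmpty && s.all (fun m => (["dirc", "egc", "mrc", "selc"] : List String).contains m)
          && (s.zip s.tail).all (fun p => p.1 != p.2)) = true := by
  constructor
  · intro hmem
    have h15 : s ∈ ([["dirc"], ["egc"], ["mrc"], ["selc"], ["dirc","egc"], ["dirc","mrc"],
        ["dirc","selc"], ["egc","mrc"], ["egc","selc"], ["mrc","selc"], ["dirc","egc","mrc"],
        ["dirc","egc","selc"], ["dirc","mrc","selc"], ["egc","mrc","selc"],
        ["dirc","egc","mrc","selc"]] : List (List String)) := by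
      have heq : (List.range (["dirc", "egc", "mrc", "selc"] : List String).length).flatMap
          (fun i => pyCombs ["dirc", "egc", "mrc", "selc"] (i + 1))
          = [["dirc"], ["egc"], ["mrc"], ["selc"], ["dirc","egc"], ["dirc","mrc"],
        ["dirc","selc"], ["egc","mrc"], ["egc","selc"], ["mrc","selc"], ["dirc","egc","mrc"],
        ["dirc","egc","selc"], ["dirc","mrc","selc"], ["egc","mrc","selc"],
        ["dirc","egc","mrc","selc"]] := by rfl
      rw [heq] at hmem; exact hmem
    fin_cases h15 <;> decide
  · intro hvalid
    simp only [Bool.and_eq_true] at hvalid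
    obtain ⟨⟨hne, hall⟩, hzip⟩ := hvalid
    have hlt : s.Pairwise (· < ·) := pairwise_lt_of_sorted_zip s hle hzip
    have hsubl : s.Sublist ["dirc", "egc", "mrc", "selc"] := by
      refine sublist_of_pairwise_lt_subset _ allowed_pairwise_lt _ hlt ?_
      intro x hx
      have := List.all_eq_true.mp hall x hx
      simpa [List.contains_eq_mem] using this
    have hmem16 : s ∈ (["dirc", "egc", "mrc", "selc"] : List String).sublists :=
      List.mem_sublists.mpr hsubl
    have hsubs : (["dirc", "egc", "mrc", "selc"] : List String).sublists
        = [[], ["dirc"], ["egc"], ["dirc","egc"], ["mrc"], ["dirc","mrc"], ["egc","mrc"],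
           ["dirc","egc","mrc"], ["selc"], ["dirc","selc"], ["egc","selc"], ["dirc","egc","selc"],
           ["mrc","selc"], ["dirc","mrc","selc"], ["egc","mrc","selc"],
           ["dirc","egc","mrc","selc"]] := by rfl
    rw [hsubs] at hmem16
    fin_cases hmem16 <;> first | (exact absurd hne (by decide)) | decide

-- ===== VERDICT (by name: the statement is the Claim_ definition above) =====
theorem check_modes_spec : Claim_equal_check_modes := by
  intro mode _
  unfold Spec_check_modes check_modes check_modes_alt
  simp only []
  have hle : (PySem.List.sorted mode (fun x => x) false).Pairwise (· ≤ ·) :=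
    PySem.List.sorted_pairwise mode (fun x => x)
  by_cases h : (PySem.List.sorted mode (fun x => x) false)
      ∈ (List.range (["dirc", "egc", "mrc", "selc"] : List String).length).flatMap
          (fun i => pyCombs ["dirc", "egc", "mrc", "selc"] (i + 1))
  · rw [if_pos h, if_pos ((mem_combs_iff_valid _ hle).mp h)]
  · rw [if_neg h]
    rw [if_neg (fun hc => h ((mem_combs_iff_valid _ hle).mpr hc))]
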